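-- pv_equiv track=rewrite | github.com/harshilkhara/LeetCode_qts | maxDistance.py | maxDistance1
-- ===== SOURCE A (Python) =====
-- def maxDistance1(nums1, nums2): # TC O(m+n) // SC O(1)
--     ans = 0
--     p1, p2 = 0, 0
--
--     while p1 < len(nums1) and p2 < len(nums2):
--         # If p1 is larger, we should move on to a smaller p1.
--         if nums1[p1] > nums2[p2]:
--             p1 += 1
--
--         # Otherwise, get their distance and move on to a smaller p2.
--         else:
--             ans = max(ans, p2 - p1)
--             p2 += 1
--
--     return ans
-- ===== SOURCE B (Python) =====
-- def maxDistance1(nums1, nums2):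
--     # Build a min-segment-tree over nums1; for each j, one tree descent finds the
--     # first index >= i whose value is <= nums2[j] (replaces the inner pointer scan).
--     m = len(nums1)
--     if m == 0:
--         return 0
--
--     def build(lo, hi):  # node: (lo, hi, subtree min, left, right)
--         if hi - lo == 1:
--             return (lo, hi, nums1[lo], None, None)
--         mid = (lo + hi) // 2
--         l = build(lo, mid)
--         r = build(mid, hi)
--         return (lo, hi, min(l[2], r[2]), l, r)
--
--     def query(t, i, y):  # first index >= i in t's range with nums1(index) <= y, else None
--         lo, hi, mn, l, r = t
--         if hi <= i or mn > y:
--             return None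
--         if hi - lo == 1:
--             return lo
--         res = query(l, i, y)
--         return res if res is not None else query(r, i, y)
--
--     t = build(0, m)
--     ans = 0
--     i = 0
--     for j, y in enumerate(nums2):
--         nxt = query(t, i, y)
--         if nxt is None:
--             break
--         i = nxt
--         ans = max(ans, j - i)
--     return ans
-- ===== Notes on version B (the rewrite author's own statement) =====
-- stated objective: alternative
-- what changed: Replaces A's interleaved two-pointer sweep with a min-segment-tree built over nums1: for each element of nums2 a single pruned tree descent finds the first index >= i with nums1[index] <= y, instead of stepping the nums1 pointer one cell at a time.
import Mathlib
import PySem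

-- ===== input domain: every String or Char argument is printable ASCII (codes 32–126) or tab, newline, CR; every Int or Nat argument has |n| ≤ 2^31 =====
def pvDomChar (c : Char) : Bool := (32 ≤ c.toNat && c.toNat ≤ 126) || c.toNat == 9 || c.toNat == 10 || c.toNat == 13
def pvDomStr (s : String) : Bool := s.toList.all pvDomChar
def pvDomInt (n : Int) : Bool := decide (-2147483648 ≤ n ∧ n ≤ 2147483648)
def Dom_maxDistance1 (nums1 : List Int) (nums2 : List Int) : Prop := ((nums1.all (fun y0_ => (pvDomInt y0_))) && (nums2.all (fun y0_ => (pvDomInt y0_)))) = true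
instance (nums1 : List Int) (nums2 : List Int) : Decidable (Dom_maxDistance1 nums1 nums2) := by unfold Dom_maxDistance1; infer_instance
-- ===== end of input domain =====

-- B replaces A's interleaved two-pointer sweep by a min-segment-tree over nums1: per element of
-- nums2 one tree descent finds the next usable index (alternative data structure; no speed claim).

-- tiny named termination/bounds facts the ports cite (kept above because the port defs use them)
theorem pvDecA1 (a p1 b : Nat) (h : p1 < a) : (a - (p1+1)) + b < (a - p1) + b :=
  Nat.add_lt_add_right (Nat.sub_lt_sub_left h (Nat.lt_succ_self p1)) b
theorem pvDecA2 (a p2 b : Nat) (h : p2 < a) : b + (a - (p2+1)) < b + (a - p2) :=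
  Nat.add_lt_add_left (Nat.sub_lt_sub_left h (Nat.lt_succ_self p2)) b
theorem pvMidLt (lo hi : Nat) (h : lo < hi) : (lo + hi) / 2 < hi :=
  Nat.div_lt_of_lt_mul (by rw [Nat.two_mul]; exact Nat.add_lt_add_right h hi)
theorem pvTwoLe (lo hi : Nat) (h : lo < hi) (h3 : ¬ hi - lo = 1) : lo + 2 ≤ hi := by omega
theorem pvMidGt (lo hi : Nat) (h : lo + 2 ≤ hi) : lo < (lo + hi) / 2 := by omega
theorem pvDecT1 (lo hi : Nat) (h : lo < hi) : (lo + hi) / 2 - lo < hi - lo := by omega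

-- ===== PORT A =====
-- while p1 < len(nums1) and p2 < len(nums2): if nums1[p1] > nums2[p2]: p1 += 1 else: ans = max(ans, p2-p1); p2 += 1
def pvLoopA (nums1 : List Int) (nums2 : List Int) (ans : Int) (p1 p2 : Nat) : Int :=
  if h : p1 < nums1.length ∧ p2 < nums2.length then
    if nums1[p1]'h.1 > nums2[p2]'h.2 then
      pvLoopA nums1 nums2 ans (p1 + 1) p2
    else
      pvLoopA nums1 nums2 (max ans ((p2 : Int) - (p1 : Int))) p1 (p2 + 1)
  else ans
termination_by (nums1.length - p1) + (nums2.length - p2)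
decreasing_by
  · exact pvDecA1 nums1.length p1 _ h.1
  · exact pvDecA2 nums2.length p2 _ h.2

def maxDistance1 (nums1 : List Int) (nums2 : List Int) : Int :=
  pvLoopA nums1 nums2 0 0 0

-- ===== PORT B =====
-- Python node tuple (lo, hi, mn, l, r): a leaf carries its index and value (hi = lo+1), an inner
-- node its range, subtree minimum and children
inductive PvTree where
  | leaf : Nat → Int → PvTree
  | node : Nat → Nat → Int → PvTree → PvTree → PvTree

def pvMn : PvTree → Int
  | .leaf _ v => v
  | .node _ _ mn _ _ => mn

-- def build(lo, hi): if hi - lo == 1: leaf else node over the two halves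
-- (the bounds lo < hi ≤ len are threaded as proofs so nums1[lo] is the same in-range access Python makes)
def pvBuild (nums1 : List Int) (lo hi : Nat) (h1 : lo < hi) (h2 : hi ≤ nums1.length) : PvTree :=
  if h3 : hi - lo = 1 then
    .leaf lo (nums1[lo]'(Nat.lt_of_lt_of_le h1 h2))
  else
    let l := pvBuild nums1 lo ((lo + hi) / 2) (pvMidGt lo hi (pvTwoLe lo hi h1 h3))
      (Nat.le_trans (Nat.le_of_lt (pvMidLt lo hi h1)) h2)
    let r := pvBuild nums1 ((lo + hi) / 2) hi (pvMidLt lo hi h1) h2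
    .node lo hi (min (pvMn l) (pvMn r)) l r
termination_by hi - lo
decreasing_by
  · exact pvDecT1 lo hi h1
  · exact Nat.sub_lt_sub_left h1 (pvMidGt lo hi (pvTwoLe lo hi h1 h3))

-- def query(t, i, y): None if hi <= i or mn > y; a leaf answers its index; else left child first
def pvQuery (t : PvTree) (i : Nat) (y : Int) : Option Nat :=
  match t with
  | .leaf lo v => if lo + 1 ≤ i ∨ v > y then none else some lo
  | .node _ hi mn l r =>
    if hi ≤ i ∨ mn > y then none
    else match pvQuery l i y with
      | some k => some k
      | none => pvQuery r i y

-- for j, y in enumerate(nums2): nxt = query(t, i, y); break on None; i = nxt; ans = max(ans, j - i)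
def pvGoB (t : PvTree) (ans : Int) (i : Nat) (pairs : List (Int × Int)) : Int :=
  match pairs with
  | [] => ans
  | (j, y) :: rest =>
    match pvQuery t i y with
    | none => ans
    | some k => pvGoB t (max ans (j - (k : Int))) k rest

def maxDistance1_alt (nums1 : List Int) (nums2 : List Int) : Int :=
  if h : nums1.length = 0 then 0
  else pvGoB (pvBuild nums1 0 nums1.length (Nat.pos_of_ne_zero h) (Nat.le_refl _)) 0 0
    (PySem.List.enumerate nums2)

-- ===== PRECONDITION & SPEC =====
def Spec_maxDistance1 (nums1 : List Int) (nums2 : List Int) (out : Int) : Prop := out = maxDistance1_alt nums1 nums2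
instance (nums1 : List Int) (nums2 : List Int) (out : Int) : Decidable (Spec_maxDistance1 nums1 nums2 out) := by unfold Spec_maxDistance1; infer_instance

-- ===== CLAIM (what is proved, stated in full; the proofs are below) =====
def Claim_equal_maxDistance1 : Prop := ∀ (nums1 : List Int) (nums2 : List Int), Dom_maxDistance1 nums1 nums2 → Spec_maxDistance1 nums1 nums2 (maxDistance1 nums1 nums2)

-- ===== LEMMAS AND PROOFS =====

theorem pvDecB (a i : Nat) (h : i < a) : a - (i+1) < a - i :=
  Nat.sub_lt_sub_left h (Nat.lt_succ_self i)

-- A-side alignment: the inner `advance i past values > y` scan, as a function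
def pvSkip (nums1 : List Int) (y : Int) (i : Nat) : Nat :=
  if h : i < nums1.length then
    if nums1[i]'h > y then pvSkip nums1 y (i + 1) else i
  else i
termination_by nums1.length - i
decreasing_by exact pvDecB nums1.length i h

-- the j-major reading of A: per (j, y) skip then record, stop when nums1 is exhausted
def pvGo (nums1 : List Int) (i : Nat) (best : Int) (pairs : List (Int × Int)) : Int :=
  match pairs with
  | [] => best
  | (j, y) :: rest =>
    let i' := pvSkip nums1 y i
    if i' = nums1.length then best
    else pvGo nums1 i' (max best (j - (i' : Int))) rest

theorem pvSkip_at_length (nums1 : List Int) (y : Int) : pvSkip nums1 y nums1.length = nums1.length := by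
  rw [pvSkip]; simp

theorem pvSkip_gt (nums1 : List Int) (y : Int) (i : Nat) (h : i < nums1.length)
    (hgt : nums1[i]'h > y) : pvSkip nums1 y i = pvSkip nums1 y (i + 1) := by
  rw [pvSkip]; simp [h, hgt]

theorem pvSkip_le (nums1 : List Int) (y : Int) (i : Nat) (h : i < nums1.length)
    (hle : ¬ nums1[i]'h > y) : pvSkip nums1 y i = i := by
  rw [pvSkip]; simp [h, hle]

theorem drop_enumerate_lt (nums2 : List Int) (p2 : Nat) (h : p2 < nums2.length) :
    (PySem.List.enumerate nums2).drop p2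
      = ((p2 : Int), nums2[p2]'h) :: (PySem.List.enumerate nums2).drop (p2 + 1) := by
  have hlen : p2 < (PySem.List.enumerate nums2).length := by
    simpa [PySem.List.length_enumerate] using h
  rw [List.drop_eq_getElem_cons hlen]
  simp [PySem.List.getElem_enumerate]

theorem drop_enumerate_ge (nums2 : List Int) (p2 : Nat) (h : ¬ p2 < nums2.length) :
    (PySem.List.enumerate nums2).drop p2 = [] := by
  apply List.drop_eq_nil_of_le
  simpa [PySem.List.length_enumerate] using Nat.le_of_not_lt h

theorem loopA_eq_go (nums1 nums2 : List Int) (ans : Int) (p1 p2 : Nat) (hp1 : p1 ≤ nums1.length) :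
    pvLoopA nums1 nums2 ans p1 p2 = pvGo nums1 p1 ans ((PySem.List.enumerate nums2).drop p2) := by
  induction ans, p1, p2 using pvLoopA.induct nums1 nums2 with
  | case1 ans p1 p2 h hgt ih =>
    rw [pvLoopA, dif_pos h, if_pos hgt]
    rw [ih (by omega)]
    rw [drop_enumerate_lt nums2 p2 h.2]
    by_cases h3 : p2 + 1 < nums2.length
    · rw [drop_enumerate_lt nums2 (p2+1) h3]
      simp only [pvGo, pvSkip_gt nums1 _ p1 h.1 hgt]
    · rw [drop_enumerate_ge nums2 (p2+1) h3]
      simp only [pvGo, pvSkip_gt nums1 _ p1 h.1 hgt]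
  | case2 ans p1 p2 h hle ih =>
    rw [pvLoopA, dif_pos h, if_neg hle]
    rw [ih hp1]
    rw [drop_enumerate_lt nums2 p2 h.2]
    have hsk : pvSkip nums1 (nums2[p2]'h.2) p1 = p1 := pvSkip_le nums1 _ p1 h.1 hle
    simp only [pvGo, hsk]
    have : ¬ p1 = nums1.length := by omega
    simp [this]
  | case3 ans p1 p2 h =>
    rw [pvLoopA, dif_neg h]
    rcases Nat.lt_or_ge p2 nums2.length with h2 | h2
    · -- p2 in range, so p1 = nums1.length
      have hp1e : p1 = nums1.length := by
        rcases Nat.lt_or_ge p1 nums1.length with h1 | h1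
        · exact absurd ⟨h1, h2⟩ h
        · omega
      rw [drop_enumerate_lt nums2 p2 h2]
      subst hp1e
      simp [pvGo, pvSkip_at_length]
    · rw [drop_enumerate_ge nums2 p2 (by omega)]
      rfl

-- characterisation of pvSkip
theorem pvSkip_spec (nums1 : List Int) (y : Int) (i : Nat) (hi : i ≤ nums1.length) :
    i ≤ pvSkip nums1 y i ∧ pvSkip nums1 y i ≤ nums1.length ∧
    (∀ k (hk : k < nums1.length), i ≤ k → k < pvSkip nums1 y i → nums1[k]'hk > y) ∧
    (∀ hs : pvSkip nums1 y i < nums1.length, ¬ nums1[pvSkip nums1 y i]'hs > y) := by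
  revert hi
  induction i using pvSkip.induct nums1 y with
  | case1 i h hgt ih =>
    intro hi
    rw [pvSkip_gt nums1 y i h hgt]
    obtain ⟨ih1, ih2, ih3, ih4⟩ := ih (by omega)
    refine ⟨by omega, ih2, ?_, ih4⟩
    intro k hk hik hks
    rcases Nat.lt_or_ge k (i + 1) with hk1 | hk1
    · have : k = i := by omega
      subst this; exact hgt
    · exact ih3 k hk hk1 hks
  | case2 i h hle =>
    intro hi
    rw [pvSkip_le nums1 y i h hle]
    exact ⟨Nat.le_refl _, Nat.le_of_lt h, by omega, fun _ => hle⟩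
  | case3 i h =>
    intro hi
    have he : pvSkip nums1 y i = i := by rw [pvSkip, dif_neg h]
    rw [he]
    exact ⟨Nat.le_refl _, hi, by omega, fun hs => absurd hs h⟩

-- the tree built over nums1[lo:hi] (structure invariant)
inductive PvRep (nums1 : List Int) : PvTree → Nat → Nat → Prop where
  | leaf (lo : Nat) (h : lo < nums1.length) : PvRep nums1 (.leaf lo (nums1[lo]'h)) lo (lo+1)
  | node (lo mid hi : Nat) (l r : PvTree)
      (hl : PvRep nums1 l lo mid) (hr : PvRep nums1 r mid hi) :
      PvRep nums1 (.node lo hi (min (pvMn l) (pvMn r)) l r) lo hi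

theorem pvRep_lo_lt (nums1 : List Int) (t : PvTree) (lo hi : Nat)
    (h : PvRep nums1 t lo hi) : lo < hi := by
  induction h with
  | leaf lo h => omega
  | node lo mid hi l r hl hr ihl ihr => omega

theorem pvRep_mn_le (nums1 : List Int) (t : PvTree) (lo hi : Nat)
    (h : PvRep nums1 t lo hi) :
    ∀ k (hk : k < nums1.length), lo ≤ k → k < hi → pvMn t ≤ nums1[k]'hk := by
  induction h with
  | leaf lo h =>
    intro k hk hlo hhi
    have : k = lo := by omega
    subst this
    simp [pvMn]
  | node lo mid hi l r hl hr ihl ihr =>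
    intro k hk hlo hhi
    rcases Nat.lt_or_ge k mid with hm | hm
    · exact le_trans (min_le_left _ _) (ihl k hk hlo hm)
    · exact le_trans (min_le_right _ _) (ihr k hk hm hhi)

theorem pvBuild_rep (nums1 : List Int) (lo hi : Nat) (h1 : lo < hi) (h2 : hi ≤ nums1.length) :
    PvRep nums1 (pvBuild nums1 lo hi h1 h2) lo hi := by
  induction lo, hi, h1, h2 using pvBuild.induct nums1 with
  | case1 lo hi h1 h2 h3 =>
    rw [pvBuild, dif_pos h3]
    have he : hi = lo + 1 := by omega
    subst he
    exact PvRep.leaf lo (Nat.lt_of_lt_of_le h1 h2)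
  | case2 lo hi h1 h2 h3 ihl ihr =>
    rw [pvBuild, dif_neg h3]
    exact PvRep.node lo ((lo + hi) / 2) hi _ _ ihl ihr

-- query answers: the FIRST index ≥ i inside [lo, hi) whose value is ≤ y (none when there is none)
theorem pvQuery_spec (nums1 : List Int) (t : PvTree) (lo hi : Nat)
    (hrep : PvRep nums1 t lo hi) (i : Nat) (y : Int) :
    (∀ k, pvQuery t i y = some k →
      i ≤ k ∧ lo ≤ k ∧ k < hi ∧ ∃ hk : k < nums1.length, nums1[k]'hk ≤ y ∧
        (∀ k' (hk' : k' < nums1.length), i ≤ k' → lo ≤ k' → k' < k → nums1[k']'hk' > y)) ∧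
    (pvQuery t i y = none →
      ∀ k (hk : k < nums1.length), i ≤ k → lo ≤ k → k < hi → nums1[k]'hk > y) := by
  induction hrep with
  | leaf lo h =>
    constructor
    · intro k hk
      by_cases hc : lo + 1 ≤ i ∨ nums1[lo]'h > y
      · rw [pvQuery, if_pos hc] at hk
        simp at hk
      · rw [pvQuery, if_neg hc] at hk
        injection hk with hk2
        subst hk2
        have hc1 : ¬ lo + 1 ≤ i := fun hx => hc (Or.inl hx)
        have hc2 : nums1[lo]'h ≤ y := le_of_not_gt (fun hx => hc (Or.inr hx))
        exact ⟨by omega, Nat.le_refl _, by omega, h, hc2, by omega⟩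
    · intro hn k hk hik hlok hkhi
      by_cases hc : lo + 1 ≤ i ∨ nums1[lo]'h > y
      · have hkeq : k = lo := by omega
        subst hkeq
        rcases hc with hc | hc
        · omega
        · exact hc
      · rw [pvQuery, if_neg hc] at hn
        simp at hn
  | node lo mid hi l r hl hr ihl ihr =>
    have hmn := pvRep_mn_le nums1 (.node lo hi (min (pvMn l) (pvMn r)) l r) lo hi
      (PvRep.node lo mid hi l r hl hr)
    constructor
    · intro k hk
      by_cases hc : hi ≤ i ∨ min (pvMn l) (pvMn r) > y
      · rw [pvQuery, if_pos hc] at hk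
        simp at hk
      · rw [pvQuery, if_neg hc] at hk
        cases hql : pvQuery l i y with
        | some kl =>
          rw [hql] at hk
          simp only [] at hk
          injection hk with hk2
          subst hk2
          obtain ⟨ha, hb, hcc, hd, he, hf⟩ := ihl.1 kl hql
          exact ⟨ha, hb, by have := pvRep_lo_lt nums1 r mid hi hr; omega, hd, he,
            fun k' hk' h1' h2' h3' => hf k' hk' h1' h2' h3'⟩
        | none =>
          rw [hql] at hk
          simp only [] at hk
          obtain ⟨ha, hb, hcc, hd, he, hf⟩ := ihr.1 k hk
          refine ⟨ha, by have := pvRep_lo_lt nums1 l lo mid hl; omega, hcc, hd, he, ?_⟩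
          intro k' hk' h1' h2' h3'
          rcases Nat.lt_or_ge k' mid with hm | hm
          · exact ihl.2 hql k' hk' h1' h2' hm
          · exact hf k' hk' h1' hm h3'
    · intro hn k hk hik hlok hkhi
      by_cases hc : hi ≤ i ∨ min (pvMn l) (pvMn r) > y
      · rcases hc with hc | hc
        · omega
        · exact lt_of_lt_of_le hc (by simpa [pvMn] using hmn k hk hlok hkhi)
      · rw [pvQuery, if_neg hc] at hn
        cases hql : pvQuery l i y with
        | some kl =>
          rw [hql] at hn
          simp at hn
        | none =>
          rw [hql] at hn
          simp only [] at hn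
          rcases Nat.lt_or_ge k mid with hm | hm
          · exact ihl.2 hql k hk hik hlok hm
          · exact ihr.2 hn k hk hik hm hkhi

-- over the full range, query IS the skip pointer (as an Option)
theorem pvQuery_eq_skip (nums1 : List Int) (t : PvTree)
    (hrep : PvRep nums1 t 0 nums1.length) (i : Nat) (hi : i ≤ nums1.length) (y : Int) :
    pvQuery t i y =
      (if pvSkip nums1 y i < nums1.length then some (pvSkip nums1 y i) else none) := by
  obtain ⟨hs1, hs2, hs3, hs4⟩ := pvSkip_spec nums1 y i hi
  by_cases hlt : pvSkip nums1 y i < nums1.length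
  · rw [if_pos hlt]
    cases hq : pvQuery t i y with
    | none =>
      exfalso
      have := (pvQuery_spec nums1 t 0 nums1.length hrep i y).2 hq
        (pvSkip nums1 y i) hlt hs1 (Nat.zero_le _) hlt
      exact hs4 hlt this
    | some k =>
      obtain ⟨ha, _, hcc, hd, he, hf⟩ := (pvQuery_spec nums1 t 0 nums1.length hrep i y).1 k hq
      have hke : k = pvSkip nums1 y i := by
        rcases Nat.lt_trichotomy k (pvSkip nums1 y i) with hl3 | hl3 | hl3
        · exact absurd he (not_le_of_gt (hs3 k hd ha hl3))
        · exact hl3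
        · exact absurd (hf (pvSkip nums1 y i) hlt hs1 (Nat.zero_le _) hl3)
            (not_lt_of_ge (le_of_not_gt (hs4 hlt)))
      rw [hke]
  · rw [if_neg hlt]
    cases hq : pvQuery t i y with
    | none => rfl
    | some k =>
      exfalso
      obtain ⟨ha, _, hcc, hd, he, _⟩ := (pvQuery_spec nums1 t 0 nums1.length hrep i y).1 k hq
      exact absurd he (not_le_of_gt (hs3 k hd ha (by omega)))

theorem pvGo_eq_goB (nums1 : List Int) (t : PvTree)
    (hrep : PvRep nums1 t 0 nums1.length) (pairs : List (Int × Int)) :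
    ∀ i ans, i ≤ nums1.length → pvGo nums1 i ans pairs = pvGoB t ans i pairs := by
  induction pairs with
  | nil => intro i ans _; rfl
  | cons p rest ih =>
    intro i ans hi
    obtain ⟨j, y⟩ := p
    obtain ⟨hs1, hs2, _, _⟩ := pvSkip_spec nums1 y i hi
    simp only [pvGo, pvGoB, pvQuery_eq_skip nums1 t hrep i hi y]
    by_cases hlt : pvSkip nums1 y i < nums1.length
    · rw [if_pos hlt]
      have : ¬ pvSkip nums1 y i = nums1.length := by omega
      simp only [this, if_false]
      exact ih (pvSkip nums1 y i) (max ans (j - (pvSkip nums1 y i : Int))) (Nat.le_of_lt hlt)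
    · rw [if_neg hlt]
      have : pvSkip nums1 y i = nums1.length := by omega
      simp [this]

-- ===== VERDICT (by name: the statement is the Claim_ definition above) =====
theorem maxDistance1_spec : Claim_equal_maxDistance1 := by
  intro nums1 nums2 _
  unfold Spec_maxDistance1 maxDistance1 maxDistance1_alt
  by_cases h0 : nums1.length = 0
  · rw [dif_pos h0, pvLoopA]
    have : ¬ (0 < nums1.length ∧ 0 < nums2.length) := by omega
    rw [dif_neg this]
  · rw [dif_neg h0]
    have hrep := pvBuild_rep nums1 0 nums1.length (Nat.pos_of_ne_zero h0) (Nat.le_refl _)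
    rw [loopA_eq_go nums1 nums2 0 0 0 (Nat.zero_le _)]
    simpa using pvGo_eq_goB nums1 _ hrep (PySem.List.enumerate nums2) 0 0 (Nat.zero_le _)
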